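-- pv_equiv track=rewrite | github.com/GAURAV12024/Python | ValidateString.py | countValid_String_inList
-- ===== SOURCE A (Python) =====
-- def validateString(string):
-- 	if(len(string)==0):
-- 		return "invalid"
-- 	for i in string:
-- 		if i not in ['{','(','<','[','}',')','>',']']:
-- 			return "invalid String"
--
-- 	stack=[]
-- 	for i in string:
-- 		if i in ['{','(','<','[']:
-- 			stack.append(i)
-- 		elif i in ['}',')','>',']']:
-- 			if(len(stack)==0):
-- 				return "invalid string"
-- 			a=stack.pop()
-- 			if(i=='>' and a!='<'):
-- 				return "invalid string"
-- 			if(i==']' and a!='['):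
-- 				return "invalid string"
-- 			if(i=='}' and a!='{'):
-- 				return "invalid string"
-- 			if(i==')' and a!='('):
-- 				return "invalid string"
-- 	if(len(stack)==0):
-- 		return "valid"
-- 	if(len(stack)!=0):
-- 		return "Invalid"
--
-- def countValid_String_inList(list,count):
--
-- 	for i in list:
-- 		if type(i) in ["list","tuple","set"]:
-- 			countValid_String_inList(i,count)
-- 		if type(i)==str:
-- 			if(validateString(i)=="valid"):
-- 				count+=1
-- 	return count;
-- ===== SOURCE B (Python) =====
-- def _valid(s):
--     # valid iff nonempty and repeatedly deleting the substrings '()','[]','{}','<>'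
--     # reaches the empty string; any non-bracket character survives every pass,
--     # so no separate character check is needed
--     if not s:
--         return False
--     while True:
--         t = s.replace('()', '').replace('[]', '').replace('{}', '').replace('<>', '')
--         if t == s:
--             return s == ''
--         s = t
--
--
-- def countValid_String_inList(list, count):
--     return count + sum(1 for i in list if type(i) == str and _valid(i))
-- ===== Notes on version B (the rewrite author's own statement) =====
-- stated objective: alternative
-- what changed: Replaces A's single left-to-right stack simulation (push openers, pop-and-match closers, four distinct error strings) by a rewriting-to-normal-form validator: repeatedly delete the substrings '()','[]','{}','<>' via chained replace passes until a fixpoint, valid iff the nonempty string reduces to empty (non-bracket characters survive every pass, so no separate character scan is needed); the counting loop becomes count plus a sum over a predicate.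
import Mathlib
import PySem

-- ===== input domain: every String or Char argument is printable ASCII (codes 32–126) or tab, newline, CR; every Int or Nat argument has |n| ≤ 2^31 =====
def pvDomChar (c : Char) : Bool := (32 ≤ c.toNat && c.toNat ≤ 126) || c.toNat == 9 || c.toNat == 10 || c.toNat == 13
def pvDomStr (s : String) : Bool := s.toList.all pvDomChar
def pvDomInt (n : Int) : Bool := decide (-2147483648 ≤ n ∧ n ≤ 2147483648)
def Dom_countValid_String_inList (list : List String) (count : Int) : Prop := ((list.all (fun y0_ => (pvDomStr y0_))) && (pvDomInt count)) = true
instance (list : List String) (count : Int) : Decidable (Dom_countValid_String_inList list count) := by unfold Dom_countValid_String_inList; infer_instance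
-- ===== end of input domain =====

-- B replaces A's single-pass stack validator (with four distinct error strings) by a
-- rewriting validator: delete '()','[]','{}','<>' in repeated passes until a fixpoint,
-- valid iff a nonempty string reduces to empty; a genuinely different algorithm, not faster.


-- ===== PORT A =====
-- second loop of validateString: stack held as a cons list, head = Python's stack[-1]
def pvVloop : List Char → List Char → String
  | [], stack => if stack.length = 0 then "valid" else "Invalid"
  | c :: rest, stack =>
    if c ∈ ['{', '(', '<', '['] then pvVloop rest (c :: stack)
    else if c ∈ ['}', ')', '>', ']'] then
      match stack with
      | [] => "invalid string"
      | a :: st =>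
        if c = '>' ∧ a ≠ '<' then "invalid string"
        else if c = ']' ∧ a ≠ '[' then "invalid string"
        else if c = '}' ∧ a ≠ '{' then "invalid string"
        else if c = ')' ∧ a ≠ '(' then "invalid string"
        else pvVloop rest st
    else pvVloop rest stack

def pvValidateString (string : String) : String :=
  let cs := string.toList
  if cs.length = 0 then "invalid"
  -- first for-loop: returns "invalid String" at the first character outside the bracket list
  else if cs.any (fun i => ¬ (i ∈ ['{', '(', '<', '[', '}', ')', '>', ']'])) then "invalid String"
  else pvVloop cs []

-- the `type(i) in ["list","tuple","set"]` branch compares a type against strings and is always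
-- false in Python; it is omitted (list elements are strings here in any case)
def countValid_String_inList (list : List String) (count : Int) : Int :=
  list.foldl (fun count i => if pvValidateString i = "valid" then count + 1 else count) count

-- ===== PORT B =====
-- hand port of s.replace(ab, '') for a two-character pattern a,b and empty replacement:
-- Python replaces the non-overlapping occurrences left to right; for a 2-char pattern that is
-- exactly this scan (remove the two chars when they match the pattern, else advance one char)
def pvRm (a b : Char) : List Char → List Char
  | [] => []
  | [x] => [x]
  | x :: y :: rest => if x = a ∧ y = b then pvRm a b rest else x :: pvRm a b (y :: rest)

-- one iteration of B's while-loop body: the four chained .replace passes, in Python's order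
def pvStep (cs : List Char) : List Char :=
  pvRm '<' '>' (pvRm '{' '}' (pvRm '[' ']' (pvRm '(' ')' cs)))

theorem pvRm_length_le (a b : Char) (l : List Char) : (pvRm a b l).length ≤ l.length := by
  induction l using pvRm.induct a b with
  | case1 => simp [pvRm]
  | case2 x => simp [pvRm]
  | case3 x y rest h ih =>
    simp only [pvRm]; rw [if_pos h]; simp only [List.length_cons]; omega
  | case4 x y rest h ih =>
    simp only [pvRm]; rw [if_neg h]; simp only [List.length_cons] at ih ⊢; omega

theorem pvRm_eq_of_length_eq (a b : Char) (l : List Char)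
    (h : (pvRm a b l).length = l.length) : pvRm a b l = l := by
  induction l using pvRm.induct a b with
  | case1 => simp [pvRm]
  | case2 x => simp [pvRm]
  | case3 x y rest hp ih =>
    exfalso
    have := pvRm_length_le a b rest
    simp only [pvRm] at h; rw [if_pos hp] at h
    simp only [List.length_cons] at h; omega
  | case4 x y rest hp ih =>
    simp only [pvRm] at h ⊢; rw [if_neg hp] at h ⊢
    simp only [List.length_cons, Nat.add_right_cancel_iff] at h
    rw [ih h]

-- termination of B's fixpoint loop: a changing pass strictly shrinks the string
theorem pvStep_length_lt (cs : List Char) (h : pvStep cs ≠ cs) :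
    (pvStep cs).length < cs.length := by
  by_contra hge
  apply h
  have h1 := pvRm_length_le '(' ')' cs
  have h2 := pvRm_length_le '[' ']' (pvRm '(' ')' cs)
  have h3 := pvRm_length_le '{' '}' (pvRm '[' ']' (pvRm '(' ')' cs))
  have h4 := pvRm_length_le '<' '>' (pvRm '{' '}' (pvRm '[' ']' (pvRm '(' ')' cs)))
  unfold pvStep at hge ⊢
  have e1 : pvRm '(' ')' cs = cs := pvRm_eq_of_length_eq _ _ _ (by omega)
  rw [e1] at h2 h3 h4 ⊢
  have e2 : pvRm '[' ']' cs = cs := pvRm_eq_of_length_eq _ _ _ (by rw [e1] at hge; omega)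
  rw [e2] at h3 h4 ⊢
  have e3 : pvRm '{' '}' cs = cs := pvRm_eq_of_length_eq _ _ _ (by rw [e1, e2] at hge; omega)
  rw [e3] at h4 ⊢
  exact pvRm_eq_of_length_eq _ _ _ (by rw [e1, e2, e3] at hge; omega)

-- B's while-loop: iterate the pass until it changes nothing
def pvReduce (cs : List Char) : List Char :=
  if h : pvStep cs = cs then cs else pvReduce (pvStep cs)
termination_by cs.length
decreasing_by exact pvStep_length_lt cs h

def pvIsValidB (s : String) : Bool :=
  let cs := s.toList
  !cs.isEmpty && (pvReduce cs).isEmpty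

def countValid_String_inList_alt (list : List String) (count : Int) : Int :=
  count + (list.countP pvIsValidB : Int)

-- ===== PRECONDITION & SPEC =====
def Spec_countValid_String_inList (list : List String) (count : Int) (out : Int) : Prop := out = countValid_String_inList_alt list count
instance (list : List String) (count : Int) (out : Int) : Decidable (Spec_countValid_String_inList list count out) := by unfold Spec_countValid_String_inList; infer_instance

-- ===== CLAIM (what is proved, stated in full; the proofs are below) =====
def Claim_equal_countValid_String_inList : Prop := ∀ (list : List String) (count : Int), Dom_countValid_String_inList list count → Spec_countValid_String_inList list count (countValid_String_inList list count)

-- ===== LEMMAS AND PROOFS =====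

-- proof-only intermediate: the classic one-pass stack cancellation; A's loop and B's
-- fixpoint reduction are each related to it
def pvIsPair (a c : Char) : Bool :=
  (a == '(' && c == ')') || (a == '[' && c == ']') || (a == '{' && c == '}') || (a == '<' && c == '>')

def pvStepC (c : Char) (st : List Char) : List Char :=
  match st with
  | a :: t => if pvIsPair a c then t else c :: a :: t
  | [] => [c]

def pvCancel : List Char → List Char → List Char
  | [], out => out
  | c :: rest, out => pvCancel rest (pvStepC c out)

def pvIsCloser (c : Char) : Prop := c = '}' ∨ c = ')' ∨ c = '>' ∨ c = ']'
def pvIsOpener (c : Char) : Prop := c = '{' ∨ c = '(' ∨ c = '<' ∨ c = '['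

-- a closer in the cancellation stack can never be popped
theorem pvCancel_barrier (cs : List Char) (st : List Char)
    (h : ∃ x ∈ st, pvIsCloser x) : ∃ x ∈ pvCancel cs st, pvIsCloser x := by
  induction cs generalizing st with
  | nil => simpa [pvCancel] using h
  | cons c rest ih =>
    simp only [pvCancel]
    apply ih
    obtain ⟨x, hx, hcl⟩ := h
    match st, hx with
    | a :: t, hx =>
      by_cases hp : pvIsPair a c = true
      · refine ⟨x, ?_, hcl⟩
        simp only [pvStepC, hp, if_true]
        rcases List.mem_cons.mp hx with rfl | hxt
        · exfalso
          simp [pvIsCloser] at hcl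
          rcases hcl with rfl | rfl | rfl | rfl <;> simp [pvIsPair] at hp
        · exact hxt
      · exact ⟨x, by simp only [pvStepC, hp, if_false]; simp [List.mem_cons] at hx ⊢; tauto, hcl⟩

theorem pvCancel_barrier_ne_nil (cs : List Char) (st : List Char)
    (h : ∃ x ∈ st, pvIsCloser x) : pvCancel cs st ≠ [] := by
  obtain ⟨x, hx, _⟩ := pvCancel_barrier cs st h
  intro hnil
  rw [hnil] at hx
  exact List.not_mem_nil hx

-- A's loop agrees with the cancellation pass on all-bracket strings
theorem pvLoop_eq (cs : List Char) (st : List Char)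
    (hcs : ∀ c ∈ cs, c ∈ ['{', '(', '<', '[', '}', ')', '>', ']'])
    (hst : ∀ a ∈ st, pvIsOpener a) :
    (pvVloop cs st = "valid") ↔ (pvCancel cs st = []) := by
  induction cs generalizing st with
  | nil =>
    simp only [pvVloop, pvCancel, List.length_eq_zero_iff]
    constructor
    · intro h; split_ifs at h with h' <;> first | exact h' | simp_all
    · intro h; simp [h]
  | cons c rest ih =>
    have hc := hcs c (List.mem_cons_self ..)
    have hrest : ∀ x ∈ rest, x ∈ ['{', '(', '<', '[', '}', ')', '>', ']'] :=
      fun x hx => hcs x (List.mem_cons_of_mem _ hx)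
    by_cases hop : c ∈ ['{', '(', '<', '[']
    · -- opener: A pushes; the stack top (an opener) never pairs with an opener, so pvCancel pushes too
      have hA : pvVloop (c :: rest) st = pvVloop rest (c :: st) := by
        simp [pvVloop, hop]
      have hOp : pvIsOpener c := by
        simp [List.mem_cons] at hop; simp [pvIsOpener]; tauto
      have hB : pvCancel (c :: rest) st = pvCancel rest (c :: st) := by
        match st with
        | [] => simp [pvCancel, pvStepC]
        | a :: t =>
          have ha := hst a (List.mem_cons_self ..)
          have : pvIsPair a c = false := by
            simp [pvIsOpener] at hOp
            rcases hOp with rfl | rfl | rfl | rfl <;> simp [pvIsPair]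
          simp [pvCancel, pvStepC, this]
      rw [hA, hB]
      refine ih (c :: st) hrest (fun a ha => ?_)
      rcases List.mem_cons.mp ha with rfl | h
      · exact hOp
      · exact hst a h
    · -- closer
      have hcl : c ∈ ['}', ')', '>', ']'] := by
        simp [List.mem_cons] at hc hop ⊢; tauto
      have hClo : pvIsCloser c := by
        simp [List.mem_cons] at hcl; simp [pvIsCloser]; tauto
      match st with
      | [] =>
        have hA : pvVloop (c :: rest) [] = "invalid string" := by
          simp [pvVloop, hop, hcl]
        have hB : pvCancel (c :: rest) [] = pvCancel rest [c] := by simp [pvCancel, pvStepC]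
        rw [hA, hB]
        constructor
        · intro h; exact absurd h (by decide)
        · intro h; exact absurd h (pvCancel_barrier_ne_nil rest [c] ⟨c, by simp, hClo⟩)
      | a :: t =>
        have ha := hst a (List.mem_cons_self ..)
        by_cases hp : pvIsPair a c = true
        · have hA : pvVloop (c :: rest) (a :: t) = pvVloop rest t := by
            have hp' : (a = '(' ∧ c = ')') ∨ (a = '[' ∧ c = ']') ∨ (a = '{' ∧ c = '}') ∨
                (a = '<' ∧ c = '>') := by have := hp; simp [pvIsPair] at this; tauto
            rcases hp' with ⟨rfl, rfl⟩ | ⟨rfl, rfl⟩ | ⟨rfl, rfl⟩ | ⟨rfl, rfl⟩ <;> simp [pvVloop]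
          have hB : pvCancel (c :: rest) (a :: t) = pvCancel rest t := by
            simp [pvCancel, pvStepC, hp]
          rw [hA, hB]
          exact ih t hrest (fun x hx => hst x (List.mem_cons_of_mem _ hx))
        · have hA : pvVloop (c :: rest) (a :: t) = "invalid string" := by
            simp only [pvIsPair] at hp
            simp only [pvIsCloser] at hClo
            simp only [pvIsOpener] at ha
            simp only [pvVloop, hop, hcl, if_false, if_true]
            rcases hClo with rfl | rfl | rfl | rfl <;>
              rcases ha with rfl | rfl | rfl | rfl <;> simp_all
          have hB : pvCancel (c :: rest) (a :: t) = pvCancel rest (c :: a :: t) := by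
            simp [pvCancel, pvStepC, hp]
          rw [hA, hB]
          constructor
          · intro h; exact absurd h (by decide)
          · intro h
            exact absurd h (pvCancel_barrier_ne_nil rest (c :: a :: t) ⟨c, by simp, hClo⟩)

-- deleting an adjacent matched pair does not change the cancellation residue
theorem pvStepC_pair (a b : Char) (hp : pvIsPair a b = true) (st : List Char) :
    pvStepC b (pvStepC a st) = st := by
  have hp' : (a = '(' ∧ b = ')') ∨ (a = '[' ∧ b = ']') ∨ (a = '{' ∧ b = '}') ∨
      (a = '<' ∧ b = '>') := by simp [pvIsPair] at hp; tauto
  rcases hp' with ⟨rfl, rfl⟩ | ⟨rfl, rfl⟩ | ⟨rfl, rfl⟩ | ⟨rfl, rfl⟩ <;>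
    (match st with
     | [] => simp [pvStepC, pvIsPair]
     | u :: t => simp [pvStepC, pvIsPair])

theorem pvCancel_rm (a b : Char) (hp : pvIsPair a b = true) (l : List Char) (st : List Char) :
    pvCancel (pvRm a b l) st = pvCancel l st := by
  induction l using pvRm.induct a b generalizing st with
  | case1 => rfl
  | case2 x => rfl
  | case3 x y rest h ih =>
    simp only [pvRm]; rw [if_pos h]
    obtain ⟨rfl, rfl⟩ := h
    rw [ih st]
    simp only [pvCancel]
    rw [pvStepC_pair _ _ hp]
  | case4 x y rest h ih =>
    simp only [pvRm]; rw [if_neg h]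
    simp only [pvCancel]
    exact ih (pvStepC x st)

theorem pvCancel_step (cs : List Char) (st : List Char) :
    pvCancel (pvStep cs) st = pvCancel cs st := by
  unfold pvStep
  rw [pvCancel_rm '<' '>' (by decide), pvCancel_rm '{' '}' (by decide),
    pvCancel_rm '[' ']' (by decide), pvCancel_rm '(' ')' (by decide)]

theorem pvCancel_reduce (cs : List Char) : pvCancel (pvReduce cs) [] = pvCancel cs [] := by
  induction cs using pvReduce.induct with
  | case1 cs h => rw [pvReduce, dif_pos h]
  | case2 cs h ih =>
    rw [pvReduce, dif_neg h]
    rw [ih, pvCancel_step]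

theorem pvReduce_fix (cs : List Char) : pvStep (pvReduce cs) = pvReduce cs := by
  induction cs using pvReduce.induct with
  | case1 cs h => rw [pvReduce, dif_pos h]; exact h
  | case2 cs h ih => rw [pvReduce, dif_neg h]; exact ih

-- characters other than the pattern survive a replace pass …
theorem pvRm_mem (a b : Char) (l : List Char) (x : Char) (hx : x ∈ l)
    (hxa : x ≠ a) (hxb : x ≠ b) : x ∈ pvRm a b l := by
  induction l using pvRm.induct a b with
  | case1 => simpa [pvRm] using hx
  | case2 y => simpa [pvRm] using hx
  | case3 y z rest h ih =>
    simp only [pvRm]; rw [if_pos h]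
    obtain ⟨rfl, rfl⟩ := h
    rcases List.mem_cons.mp hx with rfl | hx'
    · exact absurd rfl hxa
    · rcases List.mem_cons.mp hx' with rfl | hx''
      · exact absurd rfl hxb
      · exact ih hx''
  | case4 y z rest h ih =>
    simp only [pvRm]; rw [if_neg h]; simp only [List.mem_cons]
    rcases List.mem_cons.mp hx with rfl | hx'
    · exact Or.inl rfl
    · exact Or.inr (ih hx')

-- … hence a non-bracket character survives the whole reduction
theorem pvReduce_mem (cs : List Char) (x : Char)
    (hx : x ∈ cs) (hnb : ¬ (x ∈ ['{', '(', '<', '[', '}', ')', '>', ']'])) :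
    x ∈ pvReduce cs := by
  induction cs using pvReduce.induct with
  | case1 cs h => rw [pvReduce, dif_pos h]; exact hx
  | case2 cs h ih =>
    rw [pvReduce, dif_neg h]
    apply ih
    simp only [List.mem_cons] at hnb
    unfold pvStep
    apply pvRm_mem _ _ _ _ (pvRm_mem _ _ _ _ (pvRm_mem _ _ _ _ (pvRm_mem _ _ _ _ hx
      (by tauto) (by tauto)) (by tauto) (by tauto)) (by tauto) (by tauto)) (by tauto) (by tauto)

-- an occurrence of the pattern makes a replace pass strictly shorter
theorem pvRm_lt_of_occ (a b : Char) (l : List Char)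
    (h : ∃ u v, l = u ++ a :: b :: v) : (pvRm a b l).length < l.length := by
  induction l using pvRm.induct a b with
  | case1 => obtain ⟨u, v, hu⟩ := h; simp at hu
  | case2 x =>
    obtain ⟨u, v, hu⟩ := h
    match u with
    | [] => simp at hu
    | _ :: _ => simp at hu
  | case3 x y rest hp ih =>
    have := pvRm_length_le a b rest
    simp only [pvRm]; rw [if_pos hp]
    simp only [List.length_cons]; omega
  | case4 x y rest hp ih =>
    obtain ⟨u, v, hu⟩ := h
    match u with
    | [] =>
      exfalso
      simp only [List.nil_append, List.cons.injEq] at hu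
      exact hp ⟨hu.1, hu.2.1⟩
    | w :: u' =>
      simp only [List.cons_append, List.cons.injEq] at hu
      have hocc : ∃ u v, y :: rest = u ++ a :: b :: v := ⟨u', v, hu.2⟩
      have := ih hocc
      simp only [pvRm]; rw [if_neg hp]
      simp only [List.length_cons] at this ⊢; omega

-- either no two adjacent characters form a matched pair, or the pattern occurs somewhere
theorem pvAdjOrChain (w : List Char) :
    List.IsChain (fun x y => pvIsPair x y = false) w ∨
      ∃ u a b v, w = u ++ a :: b :: v ∧ pvIsPair a b = true := by
  induction w with
  | nil => exact Or.inl List.isChain_nil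
  | cons x tail ih =>
    match tail, ih with
    | [], _ => exact Or.inl (List.isChain_singleton x)
    | y :: rest, ih =>
      by_cases hp : pvIsPair x y = true
      · exact Or.inr ⟨[], x, y, rest, rfl, hp⟩
      · rcases ih with hch | ⟨u, a, b, v, he, hpair⟩
        · exact Or.inl (List.isChain_cons_cons.mpr ⟨Bool.eq_false_iff.mpr hp, hch⟩)
        · exact Or.inr ⟨x :: u, a, b, v, by rw [he, List.cons_append], hpair⟩

-- with no adjacent matched pair the cancellation pass only pushes
theorem pvCancel_noPop (w : List Char) (a : Char) (t : List Char)
    (hch : List.IsChain (fun x y => pvIsPair x y = false) (a :: w)) :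
    pvCancel w (a :: t) = w.reverse ++ a :: t := by
  induction w generalizing a t with
  | nil => simp [pvCancel]
  | cons c rest ih =>
    obtain ⟨hac, hch'⟩ := List.isChain_cons_cons.mp hch
    simp only [pvCancel, pvStepC, hac, Bool.false_eq_true, if_false]
    rw [ih c (a :: t) hch']
    simp

theorem pvCancel_ne_nil_of_chain (w : List Char) (hw : w ≠ [])
    (hch : List.IsChain (fun x y => pvIsPair x y = false) w) : pvCancel w [] ≠ [] := by
  match w, hw with
  | x :: rest, _ =>
    have : pvCancel (x :: rest) [] = pvCancel rest [x] := by simp [pvCancel, pvStepC]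
    rw [this, pvCancel_noPop rest x [] hch]
    simp

-- a fixpoint of the pass has no adjacent matched pair (each replace is length-preserving,
-- hence the identity, hence no occurrence)
theorem pvChain_of_fix (w : List Char) (hfix : pvStep w = w) :
    List.IsChain (fun x y => pvIsPair x y = false) w := by
  rcases pvAdjOrChain w with hch | ⟨u, a, b, v, he, hpair⟩
  · exact hch
  · exfalso
    have h1 := pvRm_length_le '(' ')' w
    have h2 := pvRm_length_le '[' ']' (pvRm '(' ')' w)
    have h3 := pvRm_length_le '{' '}' (pvRm '[' ']' (pvRm '(' ')' w))
    have h4 := pvRm_length_le '<' '>' (pvRm '{' '}' (pvRm '[' ']' (pvRm '(' ')' w)))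
    have hlen : (pvStep w).length = w.length := by rw [hfix]
    unfold pvStep at hlen
    have e1 : pvRm '(' ')' w = w := pvRm_eq_of_length_eq _ _ _ (by omega)
    rw [e1] at h2 h3 h4 hlen
    have e2 : pvRm '[' ']' w = w := pvRm_eq_of_length_eq _ _ _ (by omega)
    rw [e2] at h3 h4 hlen
    have e3 : pvRm '{' '}' w = w := pvRm_eq_of_length_eq _ _ _ (by omega)
    rw [e3] at h4 hlen
    have e4 : pvRm '<' '>' w = w := pvRm_eq_of_length_eq _ _ _ (by omega)
    have hp' : (a = '(' ∧ b = ')') ∨ (a = '[' ∧ b = ']') ∨ (a = '{' ∧ b = '}') ∨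
        (a = '<' ∧ b = '>') := by simp [pvIsPair] at hpair; tauto
    have hocc : ∃ u v, w = u ++ a :: b :: v := ⟨u, v, he⟩
    rcases hp' with ⟨rfl, rfl⟩ | ⟨rfl, rfl⟩ | ⟨rfl, rfl⟩ | ⟨rfl, rfl⟩
    · have := pvRm_lt_of_occ '(' ')' w hocc; rw [e1] at this; omega
    · have := pvRm_lt_of_occ '[' ']' w hocc; rw [e2] at this; omega
    · have := pvRm_lt_of_occ '{' '}' w hocc; rw [e3] at this; omega
    · have := pvRm_lt_of_occ '<' '>' w hocc; rw [e4] at this; omega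

theorem pvReduce_iff_cancel (cs : List Char) : pvReduce cs = [] ↔ pvCancel cs [] = [] := by
  constructor
  · intro h
    rw [← pvCancel_reduce, h]
    rfl
  · intro h
    by_contra hne
    have hch := pvChain_of_fix (pvReduce cs) (pvReduce_fix cs)
    have := pvCancel_ne_nil_of_chain (pvReduce cs) hne hch
    rw [pvCancel_reduce] at this
    exact this h

-- the two validators agree
theorem pvValidate_eq (s : String) : (pvValidateString s = "valid") ↔ (pvIsValidB s = true) := by
  unfold pvValidateString pvIsValidB
  by_cases h0 : s.toList.length = 0
  · have hnil : s.toList = [] := List.length_eq_zero_iff.mp h0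
    simp [hnil]
  · by_cases hbad : s.toList.any (fun i => ¬ (i ∈ ['{', '(', '<', '[', '}', ')', '>', ']']))
    · simp only [h0, if_false, hbad, if_true]
      constructor
      · intro h; exact absurd h (by decide)
      · intro h
        simp only [List.any_eq_true, decide_eq_true_eq] at hbad
        obtain ⟨x, hx, hnx⟩ := hbad
        have hmem := pvReduce_mem s.toList x hx hnx
        simp only [Bool.and_eq_true, List.isEmpty_iff] at h
        rw [h.2] at hmem
        exact (List.not_mem_nil hmem).elim
    · have hall : ∀ c ∈ s.toList, c ∈ ['{', '(', '<', '[', '}', ')', '>', ']'] := by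
        intro c hcm
        by_contra hn
        exact hbad (List.any_eq_true.mpr ⟨c, hcm, decide_eq_true hn⟩)
      have hbad' : (s.toList.any fun i => decide (i ∉ ['{', '(', '<', '[', '}', ')', '>', ']'])) = false :=
        Bool.eq_false_iff.mpr hbad
      have hne : s.toList.isEmpty = false := by
        simp only [List.isEmpty_eq_false_iff]
        intro h; exact h0 (by simp [h])
      simp only [h0, if_false, hbad', Bool.false_eq_true, hne, Bool.not_false, Bool.true_and]
      rw [pvLoop_eq s.toList [] hall (by simp), ← pvReduce_iff_cancel]
      simp [List.isEmpty_iff]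

theorem pvFold_count (l : List String) (count : Int) :
    l.foldl (fun count i => if pvValidateString i = "valid" then count + 1 else count) count
      = count + (l.countP pvIsValidB : Int) := by
  induction l generalizing count with
  | nil => simp [List.countP]
  | cons x xs ih =>
    by_cases hx : pvIsValidB x = true
    · have : pvValidateString x = "valid" := (pvValidate_eq x).mpr hx
      rw [List.foldl_cons, List.countP_cons]
      simp only [this, if_true, ih, hx]
      push_cast; ring
    · have : ¬ pvValidateString x = "valid" := fun h => hx ((pvValidate_eq x).mp h)
      rw [List.foldl_cons, List.countP_cons]
      simp [this, ih, hx]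

-- ===== VERDICT (by name: the statement is the Claim_ definition above) =====
theorem countValid_String_inList_spec : Claim_equal_countValid_String_inList := by
  intro list count _
  unfold Spec_countValid_String_inList countValid_String_inList countValid_String_inList_alt
  exact pvFold_count list count
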